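-- pv_equiv track=rewrite | github.com/rlr-smu/camarl | Hierarchical_MTM/environment_bsline.py | getFailVessel
-- ===== SOURCE A (Python) =====
-- def getFailVessel(tmpSuccVessel, total_horizon):
--     totalHorizon = total_horizon
--     tmpSuccVessel.append(0)
--     tmpPop = sum(tmpSuccVessel)
--     tmpFailVessel = [0]
--     for tt in range(1, totalHorizon + 1):
--         tmpFail = tmpPop - sum(tmpSuccVessel[1:tt + 1])
--         tmpFailVessel.append(tmpFail)
--     return tmpSuccVessel, tmpFailVessel
-- ===== SOURCE B (Python) =====
-- def getFailVessel(tmpSuccVessel, total_horizon):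
--     # O(n + H): keep a running remainder instead of re-summing a slice each step.
--     tmpSuccVessel.append(0)
--     running = sum(tmpSuccVessel)
--     n = len(tmpSuccVessel)
--     tmpFailVessel = [0]
--     for tt in range(1, total_horizon + 1):
--         if tt < n:
--             running -= tmpSuccVessel[tt]
--         tmpFailVessel.append(running)
--     return tmpSuccVessel, tmpFailVessel
-- ===== Notes on version B (the rewrite author's own statement) =====
-- stated objective: faster
-- what changed: Replaces the per-step re-summation of the slice tmpSuccVessel[1:tt+1] by a single running remainder that is decremented once per step, turning the quadratic loop into a linear one-pass loop.
import Mathlib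
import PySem

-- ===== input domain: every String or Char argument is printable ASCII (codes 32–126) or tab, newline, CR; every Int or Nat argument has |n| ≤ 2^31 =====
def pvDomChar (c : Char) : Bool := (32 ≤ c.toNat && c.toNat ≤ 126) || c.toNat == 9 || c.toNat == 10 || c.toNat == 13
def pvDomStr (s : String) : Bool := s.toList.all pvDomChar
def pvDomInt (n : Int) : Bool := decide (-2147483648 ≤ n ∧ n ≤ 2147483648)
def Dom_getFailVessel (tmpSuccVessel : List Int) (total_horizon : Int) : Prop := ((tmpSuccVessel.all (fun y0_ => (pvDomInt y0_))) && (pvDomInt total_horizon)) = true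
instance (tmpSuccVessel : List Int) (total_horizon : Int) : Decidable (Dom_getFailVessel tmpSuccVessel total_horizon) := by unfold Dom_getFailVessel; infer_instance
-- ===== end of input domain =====

-- B replaces A's per-step slice re-summation by a single running remainder (O(n+H) instead of O(H·n)).
-- Both Pythons append 0 to the argument list in place (same mutation); the theorems are about the return value.

-- ===== PORT A =====
def getFailVessel (tmpSuccVessel : List Int) (total_horizon : Int) : List Int × List Int :=
  let s := tmpSuccVessel ++ [0]
  let tmpPop := s.sum
  let tmpFailVessel :=
    (PySem.List.pyRange 1 (total_horizon + 1) 1).foldl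
      (fun acc tt => acc ++ [tmpPop - (PySem.List.slice s (some 1) (some (tt + 1))).sum])
      [0]
  (s, tmpFailVessel)

-- ===== PORT B =====
def getFailVessel_alt (tmpSuccVessel : List Int) (total_horizon : Int) : List Int × List Int :=
  let s := tmpSuccVessel ++ [0]
  let st :=
    (PySem.List.pyRange 1 (total_horizon + 1) 1).foldl
      (fun (st : Int × List Int) tt =>
        let r := if tt < (s.length : Int) then st.1 - PySem.List.pyGetD s tt 0 else st.1
        (r, st.2 ++ [r]))
      (s.sum, [0])
  (s, st.2)

-- ===== PRECONDITION & SPEC =====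
def Spec_getFailVessel (tmpSuccVessel : List Int) (total_horizon : Int) (out : List Int × List Int) : Prop := out = getFailVessel_alt tmpSuccVessel total_horizon
instance (tmpSuccVessel : List Int) (total_horizon : Int) (out : List Int × List Int) : Decidable (Spec_getFailVessel tmpSuccVessel total_horizon out) := by unfold Spec_getFailVessel; infer_instance

-- ===== CLAIM (what is proved, stated in full; the proofs are below) =====
def Claim_equal_getFailVessel : Prop := ∀ (tmpSuccVessel : List Int) (total_horizon : Int), Dom_getFailVessel tmpSuccVessel total_horizon → Spec_getFailVessel tmpSuccVessel total_horizon (getFailVessel tmpSuccVessel total_horizon)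

-- ===== LEMMAS AND PROOFS =====

-- the running remainder after k steps equals tmpPop minus the sum of the first k dropped-prefix elements,
-- and the two accumulated fail lists coincide
lemma pv_loop_eq (s : List Int) (tmpPop : Int) : ∀ (k : Nat),
    ((PySem.List.pyRange 1 (1 + (k : Int)) 1).foldl
        (fun (st : Int × List Int) tt =>
          let r := if tt < (s.length : Int) then st.1 - PySem.List.pyGetD s tt 0 else st.1
          (r, st.2 ++ [r]))
        (tmpPop, ([0] : List Int)))
    = (tmpPop - ((s.drop 1).take k).sum,
       (PySem.List.pyRange 1 (1 + (k : Int)) 1).foldl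
         (fun acc tt => acc ++ [tmpPop - (PySem.List.slice s (some 1) (some (tt + 1))).sum])
         [0]) := by
  intro k
  induction k with
  | zero =>
      rw [PySem.List.pyRange_one_eq_nil (by omega)]
      simp
  | succ k ih =>
      have hsplit : PySem.List.pyRange 1 (1 + ((k + 1 : Nat) : Int)) 1
          = PySem.List.pyRange 1 (1 + (k : Int)) 1 ++ [1 + (k : Int)] := by
        have := PySem.List.pyRange_one_succ_right (a := 1) (b := 1 + (k : Int)) (by omega)
        push_cast
        rw [show (1 : Int) + ((k : Int) + 1) = (1 + (k : Int)) + 1 by ring]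
        exact this
      rw [hsplit, List.foldl_append, List.foldl_append, ih]
      simp only [List.foldl_cons, List.foldl_nil]
      have hval : (if (1 + (k : Int)) < (s.length : Int)
            then tmpPop - ((s.drop 1).take k).sum - PySem.List.pyGetD s (1 + (k : Int)) 0
            else tmpPop - ((s.drop 1).take k).sum)
          = tmpPop - ((s.drop 1).take (k + 1)).sum := by
        have htake : ((s.drop 1).take (k + 1)).sum
            = ((s.drop 1).take k).sum + ((s.drop 1)[k]?).getD 0 := by
          rw [List.take_add_one]
          cases h : (s.drop 1)[k]? <;> simp
        rw [htake]
        by_cases hk : 1 + k < s.length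
        · have hlt : (1 + (k : Int)) < (s.length : Int) := by exact_mod_cast hk
          have hget : PySem.List.pyGetD s (1 + (k : Int)) 0 = ((s.drop 1)[k]?).getD 0 := by
            have : (1 + (k : Int)) = (((1 + k : Nat) : Int)) := by push_cast; ring
            rw [this, PySem.List.pyGetD_natCast]
            have : s[1 + k]? = (s.drop 1)[k]? := by
              rw [List.getElem?_drop]
            simp [List.getD, this]
          rw [if_pos hlt, hget]
          ring
        · have hge : ¬ (1 + (k : Int)) < (s.length : Int) := by
            intro hc; exact hk (by exact_mod_cast hc)
          have hnone : (s.drop 1)[k]? = none := by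
            rw [List.getElem?_eq_none_iff]
            simp only [List.length_drop]
            omega
          rw [if_neg hge, hnone]
          simp
      have hsliceA : PySem.List.slice s (some 1) (some ((1 + (k : Int)) + 1))
          = (s.drop 1).take (k + 1) := by
        have h1 : ((1 : Nat) : Int) = (1 : Int) := by norm_num
        have h2 : ((1 + (k : Int)) + 1) = (((k + 2 : Nat) : Int)) := by push_cast; ring
        rw [h2, ← h1, PySem.List.slice_natCast]
        norm_num
      rw [hval, hsliceA]

-- ===== VERDICT (by name: the statement is the Claim_ definition above) =====
theorem getFailVessel_spec : Claim_equal_getFailVessel := by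
  intro xs h _
  unfold Spec_getFailVessel getFailVessel getFailVessel_alt
  simp only []
  by_cases hpos : 0 ≤ h
  · have hk : h + 1 = 1 + ((h.toNat : Int)) := by omega
    rw [hk, pv_loop_eq]
  · rw [PySem.List.pyRange_one_eq_nil (by omega)]
    simp
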